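-- pv_equiv track=rewrite | github.com/Ganga-0410/Text_Summarizer | app1.py | calculate_sentence_scores
-- ===== SOURCE A (Python) =====
-- def calculate_sentence_scores(sentences, word_frequencies):
--     sentence_scores = {}
--
--     for sentence in sentences:
--         for word, freq in word_frequencies.items():
--             if word in sentence.lower():
--                 if sentence not in sentence_scores.keys():
--                     sentence_scores[sentence] = freq
--                 else:
--                     sentence_scores[sentence] += freq
--
--     return sentence_scores    # ... (previous code remains the same)
-- ===== SOURCE B (Python) =====
-- def calculate_sentence_scores(sentences, word_frequencies):
--     # Count occurrences of each distinct sentence once, then score each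
--     # distinct sentence in a single pass (lowercasing it once) and multiply
--     # by its multiplicity.
--     counts = {}
--     for s in sentences:
--         counts[s] = counts.get(s, 0) + 1
--     sentence_scores = {}
--     for s, c in counts.items():
--         low = s.lower()
--         total = 0
--         matched = False
--         for word, freq in word_frequencies.items():
--             if word in low:
--                 total += freq
--                 matched = True
--         if matched:
--             sentence_scores[s] = total * c
--     return sentence_scores
-- ===== Notes on version B (the rewrite author's own statement) =====
-- stated objective: alternative
-- what changed: B first builds a multiplicity counter over the sentences, then scores each DISTINCT sentence exactly once (lowercasing it a single time and summing matching frequencies in one pass) and multiplies the score by the multiplicity, instead of A's rescan of every occurrence with sentence.lower() recomputed for every (sentence, word) pair.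
import Mathlib
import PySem

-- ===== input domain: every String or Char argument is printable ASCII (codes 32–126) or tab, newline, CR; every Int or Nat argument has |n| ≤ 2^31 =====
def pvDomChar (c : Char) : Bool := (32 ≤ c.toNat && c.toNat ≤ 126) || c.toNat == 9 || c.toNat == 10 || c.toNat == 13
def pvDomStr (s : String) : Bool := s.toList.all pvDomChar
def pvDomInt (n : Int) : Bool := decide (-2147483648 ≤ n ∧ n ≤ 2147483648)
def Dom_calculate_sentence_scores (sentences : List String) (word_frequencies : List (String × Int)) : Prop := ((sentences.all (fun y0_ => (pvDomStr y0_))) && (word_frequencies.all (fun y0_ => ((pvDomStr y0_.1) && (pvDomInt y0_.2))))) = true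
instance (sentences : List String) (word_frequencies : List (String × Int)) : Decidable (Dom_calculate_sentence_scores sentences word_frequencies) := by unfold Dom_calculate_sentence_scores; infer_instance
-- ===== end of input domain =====

-- B counts each distinct sentence once, scores it in a single pass (one lower() per
-- distinct sentence) and multiplies by multiplicity, instead of A's per-occurrence rescan.

-- ===== PORT A =====
def calculate_sentence_scores (sentences : List String) (word_frequencies : List (String × Int)) : List (String × Int) :=
  (sentences.foldl (fun d sentence =>
      word_frequencies.foldl (fun d p =>
        if PySem.Str.isIn p.1 (PySem.Str.lower sentence) then
          (if d.contains sentence = false then d.insert sentence p.2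
           else d.insert sentence (d.getD sentence 0 + p.2))
        else d) d)
    (PySem.Dict.empty : PySem.Dict String Int)).items

-- ===== PORT B =====
def calculate_sentence_scores_alt (sentences : List String) (word_frequencies : List (String × Int)) : List (String × Int) :=
  let counts := sentences.foldl (fun d s => d.insert s (d.getD s 0 + 1)) (PySem.Dict.empty : PySem.Dict String Int)
  (counts.items.foldl (fun r p =>
      let low := PySem.Str.lower p.1
      let tm := word_frequencies.foldl
        (fun (tm : Int × Bool) q => if PySem.Str.isIn q.1 low then (tm.1 + q.2, true) else tm)
        ((0 : Int), false)
      if tm.2 then r.insert p.1 (tm.1 * p.2) else r)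
    (PySem.Dict.empty : PySem.Dict String Int)).items

-- ===== PRECONDITION & SPEC =====
def Spec_calculate_sentence_scores (sentences : List String) (word_frequencies : List (String × Int)) (out : List (String × Int)) : Prop := out = calculate_sentence_scores_alt sentences word_frequencies
instance (sentences : List String) (word_frequencies : List (String × Int)) (out : List (String × Int)) : Decidable (Spec_calculate_sentence_scores sentences word_frequencies out) := by unfold Spec_calculate_sentence_scores; infer_instance

-- ===== CLAIM (what is proved, stated in full; the proofs are below) =====
def Claim_equal_calculate_sentence_scores : Prop := ∀ (sentences : List String) (word_frequencies : List (String × Int)), Dom_calculate_sentence_scores sentences word_frequencies → Spec_calculate_sentence_scores sentences word_frequencies (calculate_sentence_scores sentences word_frequencies)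

-- ===== LEMMAS AND PROOFS =====

/-- Sum of the frequencies of the words occurring (as substrings) in `s.lower()`. -/
def pvScore (wf : List (String × Int)) (s : String) : Int :=
  ((wf.filter (fun p => PySem.Str.isIn p.1 (PySem.Str.lower s))).map Prod.snd).sum

/-- Does any word of `wf` occur in `s.lower()`? -/
def pvMatched (wf : List (String × Int)) (s : String) : Bool :=
  wf.any (fun p => PySem.Str.isIn p.1 (PySem.Str.lower s))

/-- B's inner fold computes (running total + score, matched-flag or). -/
theorem pvB_inner (wf : List (String × Int)) (s : String) (t : Int) (m : Bool) :
    wf.foldl (fun (tm : Int × Bool) q =>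
        if PySem.Str.isIn q.1 (PySem.Str.lower s) then (tm.1 + q.2, true) else tm) (t, m)
      = (t + pvScore wf s, m || pvMatched wf s) := by
  induction wf generalizing t m with
  | nil => simp [pvScore, pvMatched]
  | cons q rest ih =>
    simp only [List.foldl_cons]
    by_cases h : PySem.Str.isIn q.1 (PySem.Str.lower s) = true
    · rw [if_pos h, ih]
      simp only [pvScore, pvMatched, List.filter_cons, List.any_cons, h, if_pos,
        List.map_cons, List.sum_cons, Bool.true_or, Bool.or_true]
      rw [add_assoc]
    · rw [if_neg h, ih]
      simp only [Bool.not_eq_true] at h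
      simp only [pvScore, pvMatched, List.filter_cons, List.any_cons, h,
        Bool.false_or, if_neg, Bool.false_eq_true, not_false_iff]

/-- In A's matching branch both arms are one and the same insert. -/
theorem pvA_step_eq (d : PySem.Dict String Int) (t : String) (v : Int) :
    (if d.contains t = false then d.insert t v
     else d.insert t (d.getD t 0 + v)) = d.insert t (d.getD t 0 + v) := by
  by_cases h : d.contains t = false
  · rw [if_pos h, PySem.Dict.getD_of_not_contains d 0 h, zero_add]
  · rw [if_neg h]

/-- A's inner fold, lookup view. -/
theorem pvA_inner_getD (wf : List (String × Int)) (t : String)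
    (d : PySem.Dict String Int) (x : String) :
    (wf.foldl (fun d p =>
        if PySem.Str.isIn p.1 (PySem.Str.lower t) then
          (if d.contains t = false then d.insert t p.2
           else d.insert t (d.getD t 0 + p.2))
        else d) d).getD x 0
      = d.getD x 0 + (if x = t then pvScore wf t else 0) := by
  induction wf generalizing d with
  | nil => simp [pvScore]
  | cons q rest ih =>
    simp only [List.foldl_cons]
    by_cases h : PySem.Str.isIn q.1 (PySem.Str.lower t) = true
    · rw [if_pos h, pvA_step_eq, ih, PySem.Dict.getD_insert]
      simp only [pvScore, List.filter_cons, h, if_pos, List.map_cons, List.sum_cons]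
      by_cases hx : x = t
      · subst hx; simp; ring
      · simp [hx]
    · rw [if_neg h, ih]
      simp only [Bool.not_eq_true] at h
      simp only [pvScore, List.filter_cons, h, Bool.false_eq_true, not_false_iff, if_neg]

/-- A's inner fold, keys view. -/
theorem pvA_inner_keys (wf : List (String × Int)) (t : String) (d : PySem.Dict String Int) :
    (wf.foldl (fun d p =>
        if PySem.Str.isIn p.1 (PySem.Str.lower t) then
          (if d.contains t = false then d.insert t p.2
           else d.insert t (d.getD t 0 + p.2))
        else d) d).keys
      = if pvMatched wf t then (if d.contains t then d.keys else d.keys ++ [t]) else d.keys := by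
  induction wf generalizing d with
  | nil => simp [pvMatched]
  | cons q rest ih =>
    simp only [List.foldl_cons]
    by_cases h : PySem.Str.isIn q.1 (PySem.Str.lower t) = true
    · rw [if_pos h, pvA_step_eq, ih]
      have hm : pvMatched (q :: rest) t = true := by
        simp only [pvMatched, List.any_cons, h, Bool.true_or]
      rw [hm, if_pos rfl]
      simp only [PySem.Dict.contains_insert_self, if_true, ite_self]
      by_cases hc : d.contains t = true
      · rw [if_pos hc, PySem.Dict.keys_insert_of_contains d _ hc]
      · simp only [Bool.not_eq_true] at hc
        rw [if_neg (by simp [hc]), PySem.Dict.keys_insert_of_not_contains d _ hc]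
    · rw [if_neg h, ih]
      simp only [Bool.not_eq_true] at h
      have : pvMatched (q :: rest) t = pvMatched rest t := by
        simp only [pvMatched, List.any_cons, h, Bool.false_or]
      rw [this]

/-- A's outer fold, lookup view: every occurrence of x adds x's score. -/
theorem pvA_outer_getD (wf : List (String × Int)) (ss : List String)
    (d : PySem.Dict String Int) (x : String) :
    (ss.foldl (fun d sentence =>
        wf.foldl (fun d p =>
          if PySem.Str.isIn p.1 (PySem.Str.lower sentence) then
            (if d.contains sentence = false then d.insert sentence p.2
             else d.insert sentence (d.getD sentence 0 + p.2))
          else d) d) d).getD x 0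
      = d.getD x 0 + (ss.count x : Int) * pvScore wf x := by
  induction ss generalizing d with
  | nil => simp
  | cons s ss ih =>
    simp only [List.foldl_cons]
    rw [ih, pvA_inner_getD, List.count_cons]
    by_cases hx : x = s
    · subst hx
      simp only [beq_self_eq_true, if_true]
      push_cast
      ring
    · rw [if_neg hx]
      have : (s == x) = false := by
        simpa [beq_iff_eq] using fun e => hx e.symm
      simp [this]

/-- A's outer fold, keys view: matched sentences in first-occurrence order. -/
theorem pvA_outer_keys (wf : List (String × Int)) (ss : List String)
    (d : PySem.Dict String Int) :
    (ss.foldl (fun d sentence =>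
        wf.foldl (fun d p =>
          if PySem.Str.isIn p.1 (PySem.Str.lower sentence) then
            (if d.contains sentence = false then d.insert sentence p.2
             else d.insert sentence (d.getD sentence 0 + p.2))
          else d) d) d).keys
      = PySem.Set.update d.keys (ss.filter (fun s => pvMatched wf s)) := by
  induction ss generalizing d with
  | nil => simp [PySem.Set.update]
  | cons s ss ih =>
    simp only [List.foldl_cons, List.filter_cons]
    rw [ih]
    by_cases hm : pvMatched wf s = true
    · rw [if_pos hm, PySem.Set.update_cons]
      congr 1
      rw [pvA_inner_keys, if_pos hm]
      show _ = if List.contains d.keys s then d.keys else d.keys ++ [s]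
      rw [PySem.Dict.contains_eq_decide_mem_keys, List.contains_eq_mem]
    · rw [if_neg hm]
      congr 1
      rw [pvA_inner_keys, if_neg hm]

/-- set(first occurrences) commutes with an element-wise filter. -/
theorem pvOfList_filter (p : String → Bool) (ss : List String) :
    PySem.Set.ofList (ss.filter p) = (PySem.Set.ofList ss).filter p := by
  induction ss using List.reverseRecOn with
  | nil => rfl
  | append_singleton xs x ih =>
    rw [List.filter_append, PySem.Set.ofList_append_singleton]
    by_cases hp : p x = true
    · simp only [List.filter_cons, hp, if_pos, List.filter_nil]
      rw [PySem.Set.ofList_append_singleton, ih]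
      show (if PySem.Set.contains _ x then _ else _) = List.filter p (if PySem.Set.contains _ x then _ else _)
      by_cases hx : x ∈ PySem.Set.ofList xs
      · have h1 : PySem.Set.contains (PySem.Set.ofList xs) x = true := by
          simpa [PySem.Set.contains, List.contains_eq_mem] using hx
        have h2 : PySem.Set.contains ((PySem.Set.ofList xs).filter p) x = true := by
          simp [PySem.Set.contains, List.contains_eq_mem, List.mem_filter, hx, hp]
        rw [if_pos h1, if_pos h2]
      · have h1 : PySem.Set.contains (PySem.Set.ofList xs) x = false := by
          simpa [PySem.Set.contains, List.contains_eq_mem] using hx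
        have h2 : PySem.Set.contains ((PySem.Set.ofList xs).filter p) x = false := by
          simp [PySem.Set.contains, List.contains_eq_mem, List.mem_filter, hx]
        rw [if_neg (by rw [h2]; simp), if_neg (by rw [h1]; simp), List.filter_append]
        simp [hp]
    · simp only [Bool.not_eq_true] at hp
      simp only [List.filter_cons, hp, Bool.false_eq_true, not_false_iff, if_neg, List.filter_nil,
        List.append_nil, ih]
      show _ = List.filter p (if PySem.Set.contains _ x then _ else _)
      by_cases hx : x ∈ PySem.Set.ofList xs
      · rw [if_pos (by simpa [PySem.Set.contains, List.contains_eq_mem] using hx)]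
      · have h1 : (PySem.Set.ofList xs).contains x = false := by
          simpa [PySem.Set.contains, List.contains_eq_mem] using hx
        rw [if_neg (by rw [h1]; simp)]
        simp [List.filter_append, hp]

/-- A's result: the matched distinct sentences, each with count·score. -/
theorem pvA_items (wf : List (String × Int)) (ss : List String) :
    calculate_sentence_scores ss wf
      = ((PySem.Set.ofList ss).filter (fun s => pvMatched wf s)).map
          (fun s => (s, (ss.count s : Int) * pvScore wf s)) := by
  unfold calculate_sentence_scores
  have hkeys := pvA_outer_keys wf ss PySem.Dict.empty
  rw [PySem.Dict.keys_empty, PySem.Set.update_nil_left] at hkeys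
  have hnd : (ss.foldl (fun d sentence =>
      wf.foldl (fun d p =>
        if PySem.Str.isIn p.1 (PySem.Str.lower sentence) then
          (if d.contains sentence = false then d.insert sentence p.2
           else d.insert sentence (d.getD sentence 0 + p.2))
        else d) d) (PySem.Dict.empty : PySem.Dict String Int)).keys.Nodup := by
    rw [hkeys]; exact PySem.Set.nodup_ofList _
  rw [PySem.Dict.items_eq_map_keys _ hnd 0, hkeys, pvOfList_filter]
  refine List.map_congr_left (fun s _ => ?_)
  rw [pvA_outer_getD, PySem.Dict.getD_empty, zero_add]

/-- B's result: the same list with score·count. -/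
theorem pvB_items (wf : List (String × Int)) (ss : List String) :
    calculate_sentence_scores_alt ss wf
      = ((PySem.Set.ofList ss).filter (fun s => pvMatched wf s)).map
          (fun s => (s, pvScore wf s * (ss.count s : Int))) := by
  unfold calculate_sentence_scores_alt
  simp only [PySem.Dict.foldl_insert_getD_add_one_eq_counter]
  have hstep : (fun (r : PySem.Dict String Int) (p : String × Int) =>
      let low := PySem.Str.lower p.1
      let tm := wf.foldl
        (fun (tm : Int × Bool) q => if PySem.Str.isIn q.1 low then (tm.1 + q.2, true) else tm)
        ((0 : Int), false)
      if tm.2 then r.insert p.1 (tm.1 * p.2) else r)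
    = (fun r p => if pvMatched wf p.1 then r.insert p.1 (pvScore wf p.1 * p.2) else r) := by
    funext r p
    simp only [pvB_inner, zero_add, Bool.false_or]
  rw [hstep, ← List.foldl_filter,
    PySem.Dict.items_foldl_insert_fresh _ Prod.fst (fun p => pvScore wf p.1 * p.2) _
      (fun a _ => PySem.Dict.contains_empty _)
      (by
        have hnd : ((PySem.Dict.counter ss).items.map Prod.fst).Nodup := by
          have := PySem.Dict.nodup_keys_counter (κ := String) ss
          simpa [PySem.Dict.keys] using this
        exact hnd.sublist ((List.filter_sublist).map Prod.fst))]
  have hempty : (PySem.Dict.empty : PySem.Dict String Int).items = [] := rfl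
  rw [hempty, List.nil_append, PySem.Dict.items_counter, List.filter_map, List.map_map]
  simp only [Function.comp_def]

-- ===== VERDICT (by name: the statement is the Claim_ definition above) =====
theorem calculate_sentence_scores_spec : Claim_equal_calculate_sentence_scores := by
  intro ss wf _
  unfold Spec_calculate_sentence_scores
  rw [pvA_items, pvB_items]
  exact List.map_congr_left (fun s _ => by rw [Int.mul_comm])
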